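-- pv_equiv track=rewrite | github.com/javirm3/TFM | code/glmhmmt/src/glmhmmt/plots_alexis.py | _build_state_palette
-- ===== SOURCE A (Python) =====
-- from typing import Dict, List, Optional, Sequence, Tuple
--
-- _DEFAULT_COLORS = ["#1B9E77", "#D95F02", "#7570B3", "#E7298A", "#66A61E", "#E6AB02"]
--
-- _LABEL_RANK = {
--     "Engaged": 0,
--     "Disengaged": 1,
--     **{f"Disengaged {i}": i for i in range(1, 10)},
-- }
--
-- def _state_color(label: str, fallback_idx: int = 0) -> str:
--     rank = _LABEL_RANK.get(label, fallback_idx)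
--     return _DEFAULT_COLORS[rank % len(_DEFAULT_COLORS)]
--
-- def _build_state_palette(
--     state_labels_per_subj: dict,
-- ) -> Tuple[dict, list]:
--     """Return (palette_dict, hue_order) from a {subj: {k: label}} mapping."""
--     seen: dict[str, int] = {}
--     for _slbls in state_labels_per_subj.values():
--         for k, lbl in _slbls.items():
--             if lbl not in seen:
--                 seen[lbl] = _LABEL_RANK.get(lbl, len(seen))
--     ordered = sorted(seen, key=lambda l: seen[l])
--     pal = {lbl: _state_color(lbl, seen[lbl]) for lbl in ordered}
--     return pal, ordered
-- ===== SOURCE B (Python) =====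
-- from typing import Dict, List, Optional, Sequence, Tuple
--
-- _DEFAULT_COLORS = ["#1B9E77", "#D95F02", "#7570B3", "#E7298A", "#66A61E", "#E6AB02"]
--
-- _LABEL_RANK = {
--     "Engaged": 0,
--     "Disengaged": 1,
--     **{f"Disengaged {i}": i for i in range(1, 10)},
-- }
--
--
-- def _build_state_palette(
--     state_labels_per_subj: dict,
-- ) -> Tuple[dict, list]:
--     """Return (palette_dict, hue_order) from a {subj: {k: label}} mapping."""
--     # One pass and no sort call: keep `ordered` as a list of (label, rank)
--     # pairs maintained in rank order by stable insertion (a new label goes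
--     # AFTER all entries of rank <= its own, which keeps equal ranks in
--     # first-seen order).  An unseen label's fallback rank is len(ordered),
--     # the number of distinct labels met so far; `seen` only dedups.
--     seen: set = set()
--     ordered: list = []
--     for _slbls in state_labels_per_subj.values():
--         for lbl in _slbls.values():
--             if lbl in seen:
--                 continue
--             seen.add(lbl)
--             r = _LABEL_RANK.get(lbl, len(ordered))
--             i = 0
--             while i < len(ordered) and ordered[i][1] <= r:
--                 i += 1
--             ordered.insert(i, (lbl, r))
--     hue_order = [l for l, _ in ordered]
--     pal = {l: _DEFAULT_COLORS[r % len(_DEFAULT_COLORS)] for l, r in ordered}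
--     return pal, hue_order
-- ===== Notes on version B (the rewrite author's own statement) =====
-- stated objective: alternative
-- what changed: Replaces A's dict-accumulate-then-sort (build a label->rank dict in one fused scan, then call sorted with that dict as key) by a single online stable insertion sort: one pass keeps a list of (label, rank) pairs ordered by rank, inserting each new label after all entries of rank <= its own (a plain set only dedups); no rank dict and no sort call.
import Mathlib
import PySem

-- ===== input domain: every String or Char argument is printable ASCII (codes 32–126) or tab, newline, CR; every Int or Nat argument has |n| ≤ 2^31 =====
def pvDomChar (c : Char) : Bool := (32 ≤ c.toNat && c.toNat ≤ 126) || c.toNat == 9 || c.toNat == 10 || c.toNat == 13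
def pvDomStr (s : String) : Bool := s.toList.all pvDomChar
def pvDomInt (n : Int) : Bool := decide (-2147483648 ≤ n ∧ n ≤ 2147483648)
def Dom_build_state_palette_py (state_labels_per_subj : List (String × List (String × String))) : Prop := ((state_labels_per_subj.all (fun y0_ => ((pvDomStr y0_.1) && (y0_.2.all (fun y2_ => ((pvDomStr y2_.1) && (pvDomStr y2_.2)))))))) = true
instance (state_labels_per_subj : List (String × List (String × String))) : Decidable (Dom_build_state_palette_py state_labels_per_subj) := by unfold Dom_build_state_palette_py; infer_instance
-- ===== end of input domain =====

-- B replaces A's dict-accumulate-then-sort by a single online stable insertion sort over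
-- (label, rank) pairs (no dict, no sort call); same result, no speed claim (objective: alternative).

-- ===== PORT A =====
def pvDefaultColors : List String :=
  ["#1B9E77", "#D95F02", "#7570B3", "#E7298A", "#66A61E", "#E6AB02"]

-- _LABEL_RANK = {"Engaged": 0, "Disengaged": 1, **{f"Disengaged {i}": i for i in range(1, 10)}}
def pvLabelRank : PySem.Dict String Int :=
  PySem.Dict.mk [("Engaged", 0), ("Disengaged", 1),
    ("Disengaged 1", 1), ("Disengaged 2", 2), ("Disengaged 3", 3), ("Disengaged 4", 4),
    ("Disengaged 5", 5), ("Disengaged 6", 6), ("Disengaged 7", 7), ("Disengaged 8", 8),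
    ("Disengaged 9", 9)]

-- _state_color: _DEFAULT_COLORS[rank % len] — rank % 6 ∈ [0,6) so the index never raises;
-- pyGetD is the total form of that always-in-range access.
def pvStateColor (label : String) (fallbackIdx : Int) : String :=
  let rank := pvLabelRank.getD label fallbackIdx
  PySem.List.pyGetD pvDefaultColors (PySem.Int.mod rank (pvDefaultColors.length : Int)) ""

def build_state_palette_py (state_labels_per_subj : List (String × List (String × String))) : (List (String × String)) × List String :=
  -- seen: dict built over .values() then .items(); `lbl not in seen` guards the insertion
  let seen : PySem.Dict String Int :=
    state_labels_per_subj.foldl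
      (fun seen p =>
        p.2.foldl
          (fun s kv =>
            if s.contains kv.2 then s
            else s.insert kv.2 (pvLabelRank.getD kv.2 (s.size : Int)))
          seen)
      (PySem.Dict.mk [])
  -- sorted(seen, key=lambda l: seen[l]); l is always a key of seen, so seen[l] = getD l 0
  let ordered := PySem.List.sorted seen.keys (fun l => seen.getD l 0) false
  let pal := ordered.map (fun lbl => (lbl, pvStateColor lbl (seen.getD lbl 0)))
  (pal, ordered)

-- ===== PORT B =====
-- the hand-written `while i < len(ordered) and ordered[i][1] <= r` scan + list.insert,
-- as the obvious structural recursion: a new pair goes after all entries of rank ≤ its own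
def pvInsertRanked (x : String × Int) : List (String × Int) → List (String × Int)
  | [] => [x]
  | y :: ys => if y.2 ≤ x.2 then y :: pvInsertRanked x ys else x :: y :: ys

def build_state_palette_py_alt (state_labels_per_subj : List (String × List (String × String))) : (List (String × String)) × List String :=
  -- one fused pass: `seen` set for dedup, ordered (label, rank) list kept by stable insertion
  let st : PySem.Set String × List (String × Int) :=
    state_labels_per_subj.foldl
      (fun st p =>
        p.2.foldl
          (fun st kv =>
            if PySem.Set.contains st.1 kv.2 then st
            else (PySem.Set.add st.1 kv.2,
              pvInsertRanked (kv.2, pvLabelRank.getD kv.2 (st.2.length : Int)) st.2))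
          st)
      (PySem.Set.empty, [])
  let ordered := st.2
  -- hue_order = [l for l, _ in ordered]
  let hue := ordered.map (fun q => q.1)
  -- pal = {l: _DEFAULT_COLORS[r % len(_DEFAULT_COLORS)] for l, r in ordered} (labels distinct)
  let pal := ordered.map (fun q =>
    (q.1, PySem.List.pyGetD pvDefaultColors
      (PySem.Int.mod q.2 (pvDefaultColors.length : Int)) ""))
  (pal, hue)

-- ===== PRECONDITION & SPEC =====
def Spec_build_state_palette_py (state_labels_per_subj : List (String × List (String × String))) (out : (List (String × String)) × List String) : Prop := out = build_state_palette_py_alt state_labels_per_subj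
instance (state_labels_per_subj : List (String × List (String × String))) (out : (List (String × String)) × List String) : Decidable (Spec_build_state_palette_py state_labels_per_subj out) := by unfold Spec_build_state_palette_py; infer_instance

-- ===== CLAIM (what is proved, stated in full; the proofs are below) =====
def Claim_equal_build_state_palette_py : Prop := ∀ (state_labels_per_subj : List (String × List (String × String))), Dom_build_state_palette_py state_labels_per_subj → Spec_build_state_palette_py state_labels_per_subj (build_state_palette_py state_labels_per_subj)

-- ===== LEMMAS AND PROOFS =====

-- the (label, stored-rank) list A's dict holds after the labels `xs` were first seen,
-- the first one at dict size `n`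
def pvRks : List String → Int → List (String × Int)
  | [], _ => []
  | l :: t, n => (l, pvLabelRank.getD l n) :: pvRks t (n + 1)

theorem pvRks_append (xs ys : List String) (n : Int) :
    pvRks (xs ++ ys) n = pvRks xs n ++ pvRks ys (n + (xs.length : Int)) := by
  induction xs generalizing n with
  | nil => simp [pvRks]
  | cons x t ih =>
      have h : n + 1 + (t.length : Int) = n + ((t.length + 1 : Nat) : Int) := by
        push_cast; ring
      simp only [List.cons_append, pvRks, ih, List.length_cons, h]

theorem map_fst_pvRks (xs : List String) (n : Int) :
    (pvRks xs n).map (fun p => p.1) = xs := by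
  induction xs generalizing n with
  | nil => rfl
  | cons x t ih => simp [pvRks, ih]

theorem length_pvRks (xs : List String) (n : Int) :
    (pvRks xs n).length = xs.length := by
  induction xs generalizing n with
  | nil => rfl
  | cons x t ih => simp [pvRks, ih]

theorem contains_pvRks (xs : List String) (n : Int) (l : String) :
    (PySem.Dict.mk (pvRks xs n)).contains l = true ↔ l ∈ xs := by
  rw [PySem.Dict.contains_iff_mem_keys, PySem.Dict.keys_mk, map_fst_pvRks]

-- A's fused loop: processing the flat label list `ls` from the dict state for `labels`
-- lands on the dict state for labels updated with ls (first occurrences appended).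
theorem pvA_inv (ls : List String) : ∀ (labels : List String),
    ls.foldl
      (fun s l =>
        if s.contains l then s
        else s.insert l (pvLabelRank.getD l (s.size : Int)))
      (PySem.Dict.mk (pvRks labels 0))
    = PySem.Dict.mk (pvRks (PySem.Set.update labels ls) 0) := by
  induction ls with
  | nil => intro labels; simp [PySem.Set.update_nil]
  | cons l t ih =>
      intro labels
      rw [List.foldl_cons, PySem.Set.update_cons]
      by_cases hl : l ∈ labels
      · have hc : (PySem.Dict.mk (pvRks labels 0)).contains l = true :=
          (contains_pvRks labels 0 l).mpr hl
        rw [hc]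
        simp only [if_true]
        rw [ih labels, PySem.Set.add_of_mem hl]
      · have hc : (PySem.Dict.mk (pvRks labels 0)).contains l = false := by
          rw [Bool.eq_false_iff]
          intro h
          exact hl ((contains_pvRks labels 0 l).mp h)
        rw [hc]
        simp only [Bool.false_eq_true, if_false]
        have hins : (PySem.Dict.mk (pvRks labels 0)).insert l
            (pvLabelRank.getD l (((PySem.Dict.mk (pvRks labels 0)).size : Nat) : Int))
            = PySem.Dict.mk (pvRks (labels ++ [l]) 0) := by
          unfold PySem.Dict.insert
          rw [hc]
          simp only [Bool.false_eq_true, if_false]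
          have hsz : ((PySem.Dict.mk (pvRks labels 0)).size : Int) = (labels.length : Int) := by
            simp [PySem.Dict.size, length_pvRks]
          rw [pvRks_append]
          simp [pvRks, hsz]
        rw [hins, ih (labels ++ [l]), PySem.Set.add_of_not_mem hl]

-- every value A's dict stores at a key l is of the form _LABEL_RANK.get(l, i)
theorem getD_pvRks_exists (xs : List String) : ∀ (n : Int) (l : String), l ∈ xs →
    ∃ i, (PySem.Dict.mk (pvRks xs n)).getD l 0 = pvLabelRank.getD l i := by
  induction xs with
  | nil => intro n l h; exact absurd h (List.not_mem_nil)
  | cons x t ih =>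
      intro n l hl
      by_cases hx : x = l
      · refine ⟨n, ?_⟩
        simp [pvRks, PySem.Dict.getD_eq_get?_getD, PySem.Dict.get?_mk_cons, hx]
      · rcases List.mem_cons.mp hl with h | h
        · exact absurd h.symm hx
        · rcases ih (n + 1) l h with ⟨i, hi⟩
          refine ⟨i, ?_⟩
          rw [← hi]
          simp [pvRks, PySem.Dict.getD_eq_get?_getD, PySem.Dict.get?_mk_cons, hx]

-- on distinct labels, A's dict returns exactly the stored rank of each pair
theorem getD_pvRks_self (xs : List String) : ∀ (n : Int), xs.Nodup →
    ∀ q ∈ pvRks xs n, (PySem.Dict.mk (pvRks xs n)).getD q.1 0 = q.2 := by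
  induction xs with
  | nil => intro n _ q hq; exact absurd hq (List.not_mem_nil)
  | cons x t ih =>
      intro n hnd q hq
      rcases List.mem_cons.mp hq with h | h
      · subst h
        simp [pvRks, PySem.Dict.getD_eq_get?_getD, PySem.Dict.get?_mk_cons]
      · have hq1 : q.1 ∈ t := by
          have := List.mem_map_of_mem (f := fun p : String × Int => p.1) h
          rwa [map_fst_pvRks] at this
        have hx : x ≠ q.1 := fun he => (List.nodup_cons.mp hnd).1 (he ▸ hq1)
        have := ih (n + 1) (List.Nodup.of_cons hnd) q h
        rw [← this]
        simp [pvRks, PySem.Dict.getD_eq_get?_getD, PySem.Dict.get?_mk_cons, hx]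

-- _LABEL_RANK.get(l, _LABEL_RANK.get(l, i)) = _LABEL_RANK.get(l, i)
theorem pvRank_absorb (l : String) (i : Int) :
    pvLabelRank.getD l (pvLabelRank.getD l i) = pvLabelRank.getD l i := by
  rw [PySem.Dict.getD_eq_get?_getD, PySem.Dict.getD_eq_get?_getD]
  cases pvLabelRank.get? l <;> rfl

-- the nested .values()/.items() loop is the fold over the flattened label list
theorem pvFlatten {α : Type} (m : List (String × List (String × String)))
    (g : α → String → α) :
    ∀ (s : α),
    m.foldl (fun s p => p.2.foldl (fun s kv => g s kv.2) s) s
    = (m.flatMap (fun p => p.2.map (fun kv => kv.2))).foldl g s := by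
  induction m with
  | nil => intro s; rfl
  | cons p t ih =>
      intro s
      rw [List.flatMap_cons, List.foldl_append, List.foldl_cons, List.foldl_map, ih]

-- insertBy's cons equation, restated as a rfl-lemma
theorem insertBy_cons {α : Type} (before : α → α → Bool) (x y : α) (t : List α) :
    PySem.List.insertBy before x (y :: t)
      = if before x y then x :: y :: t else y :: PySem.List.insertBy before x t := rfl

-- B's hand-written insertion is insertBy on the rank component
theorem pvIns_eq_insertBy (x : String × Int) (ys : List (String × Int)) :
    pvInsertRanked x ys
      = PySem.List.insertBy (fun a b => decide (a.2 < b.2)) x ys := by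
  induction ys with
  | nil => rfl
  | cons y t ih =>
      rw [insertBy_cons]
      unfold pvInsertRanked
      by_cases h : y.2 ≤ x.2
      · have hd : decide (x.2 < y.2) = false := by simp; omega
        simp [h, hd, ih]
      · have hd : decide (x.2 < y.2) = true := by simp; omega
        simp [h, hd]

-- B's state after the distinct labels `labels` were first seen
def pvBstate (labels : List String) : List (String × Int) :=
  (pvRks labels 0).foldl (fun acc q => pvInsertRanked q acc) []

theorem pvBstate_eq_sorted (labels : List String) :
    pvBstate labels = PySem.List.sorted (pvRks labels 0) (fun q => q.2) false := by
  rw [PySem.List.sorted_eq_foldl_insertBy]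
  unfold pvBstate
  congr 1
  funext acc q
  exact pvIns_eq_insertBy q acc

theorem length_pvBstate (labels : List String) :
    (pvBstate labels).length = labels.length := by
  rw [pvBstate_eq_sorted, (PySem.List.sorted_perm _ _ _).length_eq, length_pvRks]

-- B's fused loop: processing the flat label list `ls` from the state for `labels`
-- lands on the state for labels updated with ls
theorem pvB_inv (ls : List String) : ∀ (labels : List String),
    ls.foldl
      (fun st l =>
        if PySem.Set.contains st.1 l then st
        else (PySem.Set.add st.1 l,
          pvInsertRanked (l, pvLabelRank.getD l (st.2.length : Int)) st.2))
      ((labels : PySem.Set String), pvBstate labels)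
    = ((PySem.Set.update labels ls : PySem.Set String), pvBstate (PySem.Set.update labels ls)) := by
  induction ls with
  | nil => intro labels; simp [PySem.Set.update_nil]
  | cons l t ih =>
      intro labels
      rw [List.foldl_cons, PySem.Set.update_cons]
      by_cases hl : l ∈ labels
      · rw [if_pos (by simpa [PySem.Set.contains] using hl)]
        rw [ih labels, PySem.Set.add_of_mem hl]
      · rw [if_neg (by simpa [PySem.Set.contains] using hl)]
        have hstep : pvInsertRanked (l, pvLabelRank.getD l ((labels.length : Nat) : Int)) (pvBstate labels)
            = pvBstate (labels ++ [l]) := by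
          unfold pvBstate
          rw [pvRks_append, List.foldl_append]
          simp [pvRks]
        simp only [PySem.Set.add_of_not_mem hl, length_pvBstate]
        rw [hstep]
        exact ih (labels ++ [l])

-- mapping fst commutes with a rank-keyed insertBy when every pair carries K of its label
theorem map_fst_insertBy (K : String → Int) (x : String × Int) (ys : List (String × Int))
    (hx : K x.1 = x.2) (hys : ∀ y ∈ ys, K y.1 = y.2) :
    (PySem.List.insertBy (fun a b => decide (a.2 < b.2)) x ys).map (fun q => q.1)
      = PySem.List.insertBy (fun a b => decide (K a < K b)) x.1 (ys.map (fun q => q.1)) := by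
  induction ys with
  | nil => rfl
  | cons y t ih =>
      rw [insertBy_cons, List.map_cons, insertBy_cons]
      have hy : K y.1 = y.2 := hys y List.mem_cons_self
      by_cases h : x.2 < y.2
      · rw [if_pos (by simpa using h), if_pos (by simp [hx, hy]; omega)]
        simp
      · rw [if_neg (by simpa using h), if_neg (by simp [hx, hy]; omega)]
        rw [List.map_cons, ih (fun y hy => hys y (List.mem_cons_of_mem _ hy))]

-- hence mapping fst turns the pair sort into the label sort with key K
theorem map_fst_sorted_pairs (K : String → Int) (P : List (String × Int))
    (hP : ∀ q ∈ P, K q.1 = q.2) :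
    (PySem.List.sorted P (fun q => q.2) false).map (fun q => q.1)
      = PySem.List.sorted (P.map (fun q => q.1)) K false := by
  rw [PySem.List.sorted_eq_foldl_insertBy, PySem.List.sorted_eq_foldl_insertBy,
    List.foldl_map]
  have gen : ∀ (acc : List (String × Int)), (∀ y ∈ acc, K y.1 = y.2) →
      (P.foldl (fun acc x => PySem.List.insertBy (fun a b => decide (a.2 < b.2)) x acc) acc).map (fun q => q.1)
        = P.foldl (fun acc x => PySem.List.insertBy (fun a b => decide (K a < K b)) x.1 acc) (acc.map (fun q => q.1)) := by
    induction P with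
    | nil => intro acc _; rfl
    | cons x t iht =>
        intro acc hacc
        rw [List.foldl_cons, List.foldl_cons]
        have hx : K x.1 = x.2 := hP x List.mem_cons_self
        have hacc' : ∀ y ∈ PySem.List.insertBy (fun a b => decide (a.2 < b.2)) x acc, K y.1 = y.2 := by
          intro y hy
          rcases (PySem.List.mem_insertBy _ _ _ _).mp hy with h | h
          · exact h ▸ hx
          · exact hacc y h
        rw [iht (fun q hq => hP q (List.mem_cons_of_mem _ hq)) _ hacc',
          map_fst_insertBy K x acc hx hacc]
  exact gen [] (by simp)

-- ===== VERDICT (by name: the statement is the Claim_ definition above) =====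
theorem build_state_palette_py_spec : Claim_equal_build_state_palette_py := by
  intro m _
  unfold Spec_build_state_palette_py build_state_palette_py build_state_palette_py_alt
  set F := m.flatMap (fun p => p.2.map (fun kv => kv.2)) with hF
  set L := PySem.List.dedup F with hL
  have hLnd : L.Nodup := PySem.List.nodup_dedup F
  -- A's seen dict
  have hseen :
      m.foldl
        (fun seen p =>
          p.2.foldl
            (fun s kv =>
              if s.contains kv.2 then s
              else s.insert kv.2 (pvLabelRank.getD kv.2 (s.size : Int)))
            seen)
        (PySem.Dict.mk [])
      = PySem.Dict.mk (pvRks L 0) := by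
    rw [pvFlatten (α := PySem.Dict String Int) m
      (fun s l => if s.contains l then s else s.insert l (pvLabelRank.getD l (s.size : Int)))]
    have h0 : (PySem.Dict.mk ([] : List (String × Int))) = PySem.Dict.mk (pvRks [] 0) := rfl
    rw [h0, pvA_inv F []]
    rw [hL, PySem.List.dedup_eq_ofList, ← PySem.Set.update_nil_left]
  -- B's fused pass ends in the state (dedup labels, insertion-sorted pair list)
  have hord :
      m.foldl
        (fun st p =>
          p.2.foldl
            (fun (st : PySem.Set String × List (String × Int)) kv =>
              if PySem.Set.contains st.1 kv.2 then st
              else (PySem.Set.add st.1 kv.2,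
                pvInsertRanked (kv.2, pvLabelRank.getD kv.2 (st.2.length : Int)) st.2))
            st)
        (PySem.Set.empty, [])
      = ((L : PySem.Set String), PySem.List.sorted (pvRks L 0) (fun q => q.2) false) := by
    rw [pvFlatten (α := PySem.Set String × List (String × Int)) m
      (fun st l => if PySem.Set.contains st.1 l then st
        else (PySem.Set.add st.1 l,
          pvInsertRanked (l, pvLabelRank.getD l (st.2.length : Int)) st.2))]
    have h0 : ((PySem.Set.empty : PySem.Set String), ([] : List (String × Int)))
        = ((([] : List String) : PySem.Set String), pvBstate []) := rfl
    rw [h0, pvB_inv F [], ← pvBstate_eq_sorted]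
    rw [hL, PySem.List.dedup_eq_ofList, ← PySem.Set.update_nil_left]
  simp only [hseen, hord]
  set K : String → Int := fun l => (PySem.Dict.mk (pvRks L 0)).getD l 0 with hK
  have hkeys : (PySem.Dict.mk (pvRks L 0)).keys = L := by
    rw [PySem.Dict.keys_mk, map_fst_pvRks]
  have hKq : ∀ q ∈ pvRks L 0, K q.1 = q.2 := getD_pvRks_self L 0 hLnd
  have hhue :
      (PySem.List.sorted (pvRks L 0) (fun q => q.2) false).map (fun q => q.1)
        = PySem.List.sorted (PySem.Dict.mk (pvRks L 0)).keys
            (fun l => (PySem.Dict.mk (pvRks L 0)).getD l 0) false := by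
    have h := map_fst_sorted_pairs K (pvRks L 0) hKq
    rw [map_fst_pvRks] at h
    rw [hkeys]
    exact h
  refine Prod.ext ?_ hhue.symm
  -- palettes
  simp only
  rw [← hhue, List.map_map]
  apply List.map_congr_left
  intro q hq
  have hqP : q ∈ pvRks L 0 := (PySem.List.mem_sorted _ _ _ _).mp hq
  have hq1L : q.1 ∈ L := by
    have := List.mem_map_of_mem (f := fun p : String × Int => p.1) hqP
    rwa [map_fst_pvRks] at this
  rcases getD_pvRks_exists L 0 q.1 hq1L with ⟨i, hi⟩
  have hq2 : (PySem.Dict.mk (pvRks L 0)).getD q.1 0 = q.2 := hKq q hqP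
  simp only [Function.comp, pvStateColor, hq2.symm, hi, pvRank_absorb]
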